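-- pv_equiv track=rewrite | github.com/mix060514/longpos | solve_puzzle.py | solve_pyramid_first
-- ===== SOURCE A (Python) =====
-- def solve_pyramid_first(brick_positions):
--     """
--     Optimized solver to find the first valid solution quickly
--
--     Optimizations:
--     1. Sort bricks by number of possible positions (most constrained first)
--     2. Early termination on first solution
--     3. Forward checking to reduce search space
--     """
--     # Sort bricks by number of possible positions (ascending)
--     bricks_sorted = sorted(brick_positions.keys(),
--                          key=lambda b: len(brick_positions[b]))
--
--     # Track used positions and current solution
--     used_positions = set()
--     current_solution = {}
--
--     def is_valid_remaining(remaining_bricks, available_positions):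
--         """Simple forward checking - ensure remaining bricks can still be placed"""
--         return all(any(not pos_set.intersection(available_positions)
--                       for pos_set in brick_positions[brick])
--                   for brick in remaining_bricks)
--
--     def backtrack(brick_index):
--         # Found a valid solution
--         if brick_index == len(bricks_sorted):
--             return True
--
--         current_brick = bricks_sorted[brick_index]
--
--         # Try each possible position for current brick
--         for positions in brick_positions[current_brick]:
--             positions_set = set(positions)
--
--             # Check if position is available
--             if not positions_set.intersection(used_positions):
--                 # Place the brick
--                 current_solution[current_brick] = positions
--                 used_positions.update(positions_set)
--
--                 # If found solution, propagate True back up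
--                 if backtrack(brick_index + 1):
--                     return True
--
--                 # Remove the brick (backtrack)
--                 current_solution.pop(current_brick)
--                 used_positions.difference_update(positions_set)
--
--         return False
--
--     # Start backtracking with first brick
--     found = backtrack(0)
--
--     return current_solution if found else None
-- ===== SOURCE B (Python) =====
-- def solve_pyramid_first(brick_positions):
--     """Iterative DFS over an explicit stack of self-contained frames.
--
--     Each frame is (brick, remaining positions to try, bricks still to place,
--     placements so far, cells used so far); backtracking is just popping a
--     frame, so no undo bookkeeping is needed.
--     """
--     order = sorted(brick_positions, key=lambda b: len(brick_positions[b]))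
--     if not order:
--         return {}
--     stack = [(order[0], list(brick_positions[order[0]]), order[1:], [], set())]
--     while stack:
--         brick, rem, rest, placed, used = stack.pop()
--         if not rem:
--             continue
--         pos, others = rem[0], rem[1:]
--         stack.append((brick, others, rest, placed, used))
--         pos_set = set(pos)
--         if pos_set & used:
--             continue
--         placed2 = placed + [(brick, pos)]
--         if not rest:
--             return dict(placed2)
--         nxt = rest[0]
--         stack.append((nxt, list(brick_positions[nxt]), rest[1:], placed2, used | pos_set))
--     return None
-- ===== Notes on version B (the rewrite author's own statement) =====
-- stated objective: alternative
-- what changed: Replaces the recursive backtracker that mutates a shared used-set/solution dict and undoes placements on failure by an iterative DFS over an explicit stack of self-contained snapshot frames (brick, untried positions, bricks left, placements, used cells), popped in the same exploration order, and drops the unused is_valid_remaining helper.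
import Mathlib
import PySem

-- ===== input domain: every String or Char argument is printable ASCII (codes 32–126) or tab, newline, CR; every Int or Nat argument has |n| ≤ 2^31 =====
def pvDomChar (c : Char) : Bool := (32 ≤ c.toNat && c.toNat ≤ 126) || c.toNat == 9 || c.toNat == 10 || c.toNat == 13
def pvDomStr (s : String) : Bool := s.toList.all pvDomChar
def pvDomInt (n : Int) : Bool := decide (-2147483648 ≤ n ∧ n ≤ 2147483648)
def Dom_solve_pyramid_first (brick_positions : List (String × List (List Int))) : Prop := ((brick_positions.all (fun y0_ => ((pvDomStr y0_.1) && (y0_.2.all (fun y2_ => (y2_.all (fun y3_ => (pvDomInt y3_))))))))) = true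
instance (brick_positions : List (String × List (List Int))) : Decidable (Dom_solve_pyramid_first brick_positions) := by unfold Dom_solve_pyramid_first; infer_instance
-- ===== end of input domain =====

-- B replaces A's recursive backtracking (shared mutable solution/used-set with undo)
-- by an iterative DFS over an explicit stack of self-contained snapshot frames: same
-- brick order, same first solution, no speed claim (objective: alternative).
-- A's unused helper is_valid_remaining is dropped.

-- ===== PORT A =====
-- backtrack(brick_index): the mutable used_positions / current_solution pair is
-- threaded as arguments; since Python restores both exactly on failure (the placed
-- set was disjoint, the key fresh), purity models the mutation faithfully.
-- The 'for positions in …: if ok and recursion succeeds return it' loop is findSome?.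
def pvBtA (bp : PySem.Dict String (List (List Int))) :
    List String → PySem.Set Int → PySem.Dict String (List Int) →
    Option (List (String × List Int))
  | [], _used, sol => some sol.items
  | b :: rest, used, sol =>
      (bp.getD b []).findSome? (fun positions =>
        let positions_set := PySem.Set.ofList positions
        if (PySem.Set.inter positions_set used).isEmpty then
          pvBtA bp rest (PySem.Set.update used positions_set) (sol.insert b positions)
        else
          none)

def solve_pyramid_first (brick_positions : List (String × List (List Int))) :
    Option (List (String × List Int)) :=
  let bp := PySem.Dict.ofList brick_positions
  let bricks_sorted := PySem.List.sorted bp.keys (fun b => (bp.getD b []).length)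
  pvBtA bp bricks_sorted PySem.Set.empty PySem.Dict.empty

-- ===== PORT B =====
-- a frame is (brick, remaining positions, bricks still to place, placed so far, used cells)
-- the termination measure: each frame weighs (|remaining|+1) * K^(|bricks left|+1),
-- K bigger than any position list of bp, so pushing a child frame shrinks the weight.
def pvMaxLen (bp : PySem.Dict String (List (List Int))) : Nat :=
  (bp.values.map List.length).foldl max 0

theorem pvMaxLen_getD_le (bp : PySem.Dict String (List (List Int))) (k : String) :
    (bp.getD k []).length ≤ pvMaxLen bp := by
  rw [PySem.Dict.getD_eq_get?_getD]
  cases h : bp.get? k with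
  | none => simp
  | some v =>
    have hv : (k, v) ∈ bp.items := PySem.Dict.mem_items_of_get?_eq_some bp h
    have : v.length ∈ bp.values.map List.length := by
      simp only [PySem.Dict.values, List.map_map, List.mem_map]
      exact ⟨(k, v), hv, rfl⟩
    simpa using (PySem.List.le_foldl_max (bp.values.map List.length) 0).2 _ this

def pvFrameW (bp : PySem.Dict String (List (List Int)))
    (f : String × List (List Int) × List String × List (String × List Int) × PySem.Set Int) : Nat :=
  (f.2.1.length + 1) * (pvMaxLen bp + 2) ^ (f.2.2.1.length + 1)

def pvStackW (bp : PySem.Dict String (List (List Int)))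
    (st : List (String × List (List Int) × List String × List (String × List Int) × PySem.Set Int)) : Nat :=
  (st.map (pvFrameW bp)).sum

def pvLoopB (bp : PySem.Dict String (List (List Int))) :
    List (String × List (List Int) × List String × List (String × List Int) × PySem.Set Int) →
    Option (List (String × List Int))
  | [] => none
  | (brick, rem, rest, placed, used) :: st =>
    match rem with
    | [] => pvLoopB bp st
    | pos :: others =>
      let pos_set := PySem.Set.ofList pos
      if (PySem.Set.inter pos_set used).isEmpty then
        let placed2 := placed ++ [(brick, pos)]
        match rest with
        | [] => some (PySem.Dict.ofList placed2).items
        | nxt :: rest' =>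
          pvLoopB bp ((nxt, bp.getD nxt [], rest', placed2, PySem.Set.union used pos_set) ::
                      (brick, others, nxt :: rest', placed, used) :: st)
      else
        pvLoopB bp ((brick, others, rest, placed, used) :: st)
  termination_by st => pvStackW bp st
  decreasing_by
  · -- pop an exhausted frame
    have h1 : 0 < (pvMaxLen bp + 2) ^ (rest.length + 1) := Nat.pow_pos (by omega)
    simp only [pvStackW, pvFrameW, List.map_cons, List.sum_cons, List.length_nil]
    omega
  · -- push a child frame: (|L|+1)*K^(r+1) < K^(r+2) since |L|+1 < K
    simp only [pvStackW, pvFrameW, List.map_cons, List.sum_cons, List.length_cons]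
    have hL : (bp.getD nxt []).length + 1 < pvMaxLen bp + 2 := by
      have := pvMaxLen_getD_le bp nxt; omega
    have h2 : ((bp.getD nxt []).length + 1) * (pvMaxLen bp + 2) ^ (rest'.length + 1)
        < (pvMaxLen bp + 2) ^ (rest'.length + 1 + 1) := by
      calc ((bp.getD nxt []).length + 1) * (pvMaxLen bp + 2) ^ (rest'.length + 1)
          < (pvMaxLen bp + 2) * (pvMaxLen bp + 2) ^ (rest'.length + 1) :=
            (Nat.mul_lt_mul_right (Nat.pow_pos (by omega))).mpr hL
        _ = (pvMaxLen bp + 2) ^ (rest'.length + 1 + 1) := by ring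
    have h3 : (others.length + 1 + 1) * (pvMaxLen bp + 2) ^ (rest'.length + 1 + 1)
        = (others.length + 1) * (pvMaxLen bp + 2) ^ (rest'.length + 1 + 1)
          + (pvMaxLen bp + 2) ^ (rest'.length + 1 + 1) := by ring
    omega
  · -- skip a conflicting position
    have h1 : 0 < (pvMaxLen bp + 2) ^ (rest.length + 1) := Nat.pow_pos (by omega)
    simp only [pvStackW, pvFrameW, List.map_cons, List.sum_cons, List.length_cons]
    have h3 : (others.length + 1 + 1) * (pvMaxLen bp + 2) ^ (rest.length + 1)
        = (others.length + 1) * (pvMaxLen bp + 2) ^ (rest.length + 1)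
          + (pvMaxLen bp + 2) ^ (rest.length + 1) := by ring
    omega

def solve_pyramid_first_alt (brick_positions : List (String × List (List Int))) :
    Option (List (String × List Int)) :=
  let bp := PySem.Dict.ofList brick_positions
  let order := PySem.List.sorted bp.keys (fun b => (bp.getD b []).length)
  match order with
  | [] => some []
  | b0 :: rest0 => pvLoopB bp [(b0, bp.getD b0 [], rest0, [], PySem.Set.empty)]

-- ===== PRECONDITION & SPEC =====
def Spec_solve_pyramid_first (brick_positions : List (String × List (List Int))) (out : Option (List (String × List Int))) : Prop := out = solve_pyramid_first_alt brick_positions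
instance (brick_positions : List (String × List (List Int))) (out : Option (List (String × List Int))) : Decidable (Spec_solve_pyramid_first brick_positions out) := by unfold Spec_solve_pyramid_first; infer_instance

-- ===== CLAIM (what is proved, stated in full; the proofs are below) =====
def Claim_equal_solve_pyramid_first : Prop := ∀ (brick_positions : List (String × List (List Int))), Dom_solve_pyramid_first brick_positions → Spec_solve_pyramid_first brick_positions (solve_pyramid_first brick_positions)

-- ===== LEMMAS AND PROOFS =====

theorem pvDictOfList_append {κ ν : Type} [BEq κ] (l : List (κ × ν)) (k : κ) (v : ν) :
    PySem.Dict.ofList (l ++ [(k, v)]) = (PySem.Dict.ofList l).insert k v := by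
  simp [PySem.Dict.ofList, PySem.Dict.update, List.foldl_append]

-- what A's search computes on the frame: try each remaining position of this brick,
-- descending into pvBtA for the bricks still to place.
def pvFrameRes (bp : PySem.Dict String (List (List Int)))
    (f : String × List (List Int) × List String × List (String × List Int) × PySem.Set Int) :
    Option (List (String × List Int)) :=
  f.2.1.findSome? (fun positions =>
    let positions_set := PySem.Set.ofList positions
    if (PySem.Set.inter positions_set f.2.2.2.2).isEmpty then
      pvBtA bp f.2.2.1 (PySem.Set.update f.2.2.2.2 positions_set)
        ((PySem.Dict.ofList f.2.2.2.1).insert f.1 positions)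
    else
      none)

theorem pvFrameRes_cons_eq (bp : PySem.Dict String (List (List Int))) (nxt : String)
    (rest' : List String) (placed : List (String × List Int)) (used : PySem.Set Int) :
    pvFrameRes bp (nxt, bp.getD nxt [], rest', placed, used) =
      pvBtA bp (nxt :: rest') used (PySem.Dict.ofList placed) := rfl

theorem pvFrameRes_pos_cons (bp : PySem.Dict String (List (List Int))) (brick : String)
    (pos : List Int) (others : List (List Int)) (rest : List String)
    (placed : List (String × List Int)) (used : PySem.Set Int) :
    pvFrameRes bp (brick, pos :: others, rest, placed, used) =
      match (if ((PySem.Set.ofList pos).inter used).isEmpty then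
               pvBtA bp rest (PySem.Set.update used (PySem.Set.ofList pos))
                 ((PySem.Dict.ofList placed).insert brick pos)
             else none) with
      | some b => some b
      | none => pvFrameRes bp (brick, others, rest, placed, used) := by
  simp only [pvFrameRes, List.findSome?_cons]
  generalize (if List.isEmpty ((PySem.Set.ofList pos).inter used) = true then
      pvBtA bp rest (PySem.Set.update used (PySem.Set.ofList pos))
        ((PySem.Dict.ofList placed).insert brick pos)
    else none) = X
  cases X <;> rfl

theorem pvLoopB_eq_findSome (bp : PySem.Dict String (List (List Int)))
    (st : List (String × List (List Int) × List String × List (String × List Int) × PySem.Set Int)) :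
    pvLoopB bp st = st.findSome? (pvFrameRes bp) := by
  fun_induction pvLoopB bp st with
  | case1 => rfl
  | case2 brick rest placed used st ih =>
    simp [pvFrameRes, ih]
  | case3 brick placed used st pos others pos_set h placed2 =>
    rw [List.findSome?_cons, pvFrameRes_pos_cons, if_pos h]
    have h2 : PySem.Dict.ofList placed2 = (PySem.Dict.ofList placed).insert brick pos :=
      pvDictOfList_append placed brick pos
    rw [show pvBtA bp [] (PySem.Set.update used (PySem.Set.ofList pos))
          ((PySem.Dict.ofList placed).insert brick pos)
        = some ((PySem.Dict.ofList placed).insert brick pos).items from rfl, h2]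
  | case4 brick placed used st pos others pos_set h placed2 nxt rest' ih1 =>
    rw [ih1, List.findSome?_cons, pvFrameRes_cons_eq, List.findSome?_cons,
      List.findSome?_cons, pvFrameRes_pos_cons, if_pos h]
    have h2 : PySem.Dict.ofList placed2 = (PySem.Dict.ofList placed).insert brick pos :=
      pvDictOfList_append placed brick pos
    rw [show PySem.Set.union used pos_set = PySem.Set.update used (PySem.Set.ofList pos) from rfl,
      h2]
    cases hX : pvBtA bp (nxt :: rest') (PySem.Set.update used (PySem.Set.ofList pos))
        ((PySem.Dict.ofList placed).insert brick pos) <;> simp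
  | case5 brick rest placed used st pos others pos_set h ih1 =>
    rw [ih1, List.findSome?_cons, List.findSome?_cons, pvFrameRes_pos_cons,
      if_neg h]

-- ===== VERDICT (by name: the statement is the Claim_ definition above) =====
theorem solve_pyramid_first_spec : Claim_equal_solve_pyramid_first := by
  intro bps _dom
  show solve_pyramid_first bps = solve_pyramid_first_alt bps
  simp only [solve_pyramid_first, solve_pyramid_first_alt]
  cases horder : PySem.List.sorted (PySem.Dict.ofList bps).keys
      (fun b => ((PySem.Dict.ofList bps).getD b []).length) with
  | nil => rfl
  | cons b0 rest0 =>
    dsimp only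
    rw [pvLoopB_eq_findSome, List.findSome?_cons, List.findSome?_nil, pvFrameRes_cons_eq]
    cases hX : pvBtA (PySem.Dict.ofList bps) (b0 :: rest0) PySem.Set.empty
        (PySem.Dict.ofList []) <;> simpa using hX
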